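-- pv_equiv track=rewrite | github.com/rslabon/aoc2020 | day20.py | transform
-- ===== SOURCE A (Python) =====
-- def flip(tile):
--     ftile = []
--     for row in tile:
--         ftile.append(row[::-1])
--
--     return ftile
--
-- def rotate(tile):
--     rtile = []
--     width = len(tile[0])
--     height = len(tile)
--     i = 0
--     while i < width:
--         row = []
--         j = 0
--         while j < height:
--             row.append(tile[height - 1 - j][i])
--             j += 1
--         rtile.append(row)
--         i += 1
--
--     return rtile
--
-- def freeze_tile(tile):
--     ftile = []
--     for row in tile:
--         ftile.append(tuple(row))
--     return tuple(ftile)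
--
-- def transform(tile):
--     result = []
--
--     result.append(tile)
--     result.append(flip(tile))
--
--     r1tile = rotate(tile)
--     result.append(r1tile)
--     result.append(flip(r1tile))
--
--     r2tile = rotate(r1tile)
--     result.append(r2tile)
--     result.append(flip(r2tile))
--
--     r3tile = rotate(r2tile)
--     result.append(r3tile)
--     result.append(flip(r3tile))
--
--     return set([freeze_tile(t) for t in result])
-- ===== SOURCE B (Python) =====
-- def transform(tile):
--     h, w = len(tile), len(tile[0])
--
--     def hflip(g):
--         return [row[::-1] for row in g]
--
--     # each quarter turn as a direct coordinate map: (rows, cols, cell at (i, j))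
--     quarter_turns = [
--         (w, h, lambda i, j: tile[h - 1 - j][i]),          # rotate 90
--         (h, w, lambda i, j: tile[h - 1 - i][w - 1 - j]),  # rotate 180
--         (w, h, lambda i, j: tile[j][w - 1 - i]),          # rotate 270
--     ]
--     orients = [tile, hflip(tile)]
--     for rows, cols, cell in quarter_turns:
--         g = [[cell(i, j) for j in range(cols)] for i in range(rows)]
--         orients.append(g)
--         orients.append(hflip(g))
--     return {tuple(tuple(r) for r in g) for g in orients}
-- ===== Notes on version B (the rewrite author's own statement) =====
-- stated objective: alternative
-- what changed: B builds each quarter turn directly from its D4 coordinate map ((i,j) -> tile[h-1-j][i] etc. over the h x w rectangle) and pairs it with a row-reversal mirror, instead of A's chain of four cumulative rotate() passes rebuilt element-by-element with nested while loops; Pre_ excludes exactly the inputs where A raises IndexError (empty tile, empty first row, or a row shorter than the first).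
import Mathlib
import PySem

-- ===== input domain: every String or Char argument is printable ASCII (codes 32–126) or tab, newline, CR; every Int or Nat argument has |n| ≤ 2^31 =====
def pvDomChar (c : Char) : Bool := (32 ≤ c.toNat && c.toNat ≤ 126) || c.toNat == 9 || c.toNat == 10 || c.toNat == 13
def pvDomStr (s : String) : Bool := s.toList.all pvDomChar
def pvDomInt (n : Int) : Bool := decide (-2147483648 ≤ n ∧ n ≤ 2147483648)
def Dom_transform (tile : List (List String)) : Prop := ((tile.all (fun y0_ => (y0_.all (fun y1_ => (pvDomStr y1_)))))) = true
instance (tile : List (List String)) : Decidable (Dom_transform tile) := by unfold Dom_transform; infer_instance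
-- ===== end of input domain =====

-- B builds each quarter turn directly from its D4 coordinate map and pairs it with a
-- row-reversal mirror, instead of A's chain of four cumulative rotate() passes
-- (objective: alternative decomposition, same asymptotic cost).

-- ===== PORT A =====
def pyFlip (tile : List (List String)) : List (List String) :=
  tile.foldl (fun ftile row => ftile ++ [(PySem.List.slice? row none none (-1)).getD []]) []

def pyRotate (tile : List (List String)) : List (List String) :=
  let width : Nat := ((PySem.List.pyGet? tile 0).getD []).length
  let height : Nat := tile.length
  (PySem.List.pyRange 0 (width : Int) 1).foldl (fun rtile i =>
    rtile ++ [(PySem.List.pyRange 0 (height : Int) 1).foldl (fun row j =>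
      row ++ [PySem.List.pyGetD (PySem.List.pyGetD tile ((height : Int) - 1 - j) []) i ""]) []]) []

def pyFreeze (tile : List (List String)) : List (List String) :=
  tile.foldl (fun ftile row => ftile ++ [row]) []

def transform (tile : List (List String)) : List (List (List String)) :=
  let r1 := pyRotate tile
  let r2 := pyRotate r1
  let r3 := pyRotate r2
  let result := [tile, pyFlip tile, r1, pyFlip r1, r2, pyFlip r2, r3, pyFlip r3]
  PySem.Set.ofList (result.map pyFreeze)

-- ===== PORT B =====
-- Source B's hflip helper: reverse every row
def bHFlip (g : List (List String)) : List (List String) :=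
  g.map (fun row => (PySem.List.slice? row none none (-1)).getD [])

-- Source B's grid comprehension [[cell(i, j) for j in range(cols)] for i in range(rows)]
def bBuild (rows cols : Int) (cell : Int → Int → String) : List (List String) :=
  (PySem.List.pyRange 0 rows 1).map (fun i => (PySem.List.pyRange 0 cols 1).map (cell i))

def transform_alt (tile : List (List String)) : List (List (List String)) :=
  let h : Int := tile.length
  let w : Int := ((PySem.List.pyGet? tile 0).getD []).length
  -- each quarter turn as a direct coordinate map (rows, cols, cell); tile[a][b] → pyGetD
  let quarterTurns : List (Int × Int × (Int → Int → String)) :=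
    [(w, h, fun i j => PySem.List.pyGetD (PySem.List.pyGetD tile (h - 1 - j) []) i ""),
     (h, w, fun i j => PySem.List.pyGetD (PySem.List.pyGetD tile (h - 1 - i) []) (w - 1 - j) ""),
     (w, h, fun i j => PySem.List.pyGetD (PySem.List.pyGetD tile j []) (w - 1 - i) "")]
  let orients := quarterTurns.foldl (fun acc x =>
    let g := bBuild x.1 x.2.1 x.2.2
    acc ++ [g, bHFlip g]) [tile, bHFlip tile]
  PySem.Set.ofList orients

-- ===== PRECONDITION & SPEC =====
-- Pre_ is exactly where the Python A returns: A raises IndexError on an empty tile, on an empty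
-- first row (the second rotate() then indexes the empty rotated grid), and whenever some row is
-- shorter than the first row (rotate() indexes past its end).
def Pre_transform (tile : List (List String)) : Prop :=
  tile ≠ [] ∧ tile.headD [] ≠ [] ∧ ∀ row ∈ tile, (tile.headD []).length ≤ row.length
instance (tile : List (List String)) : Decidable (Pre_transform tile) := by
  unfold Pre_transform; infer_instance

def pvWitness_transform : List (List String) := [["#", "."], [".", "#"], ["#", "#"]]

def Spec_transform (tile : List (List String)) (out : List (List (List String))) : Prop :=
  out = transform_alt tile
instance (tile : List (List String)) (out : List (List (List String))) :
    Decidable (Spec_transform tile out) := by unfold Spec_transform; infer_instance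

-- ===== CLAIM (what is proved, stated in full; the proofs are below) =====
def Claim_equal_transform : Prop := ∀ (tile : List (List String)),
  Dom_transform tile → Pre_transform tile → Spec_transform tile (transform tile)

-- ===== LEMMAS AND PROOFS =====

-- the i-th output row of a transpose-like pass: column i of g (with defaults, never hit in Pre_)
def colMap (w : Nat) (g : List (List String)) : List (List String) :=
  (List.range w).map (fun i => g.map (fun row => row.getD i ""))

theorem length_colMap (w : Nat) (g : List (List String)) : (colMap w g).length = w := by
  simp [colMap]

theorem row_len_colMap (w : Nat) (g : List (List String)) :
    ∀ r ∈ colMap w g, r.length = g.length := by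
  intro r hr
  simp only [colMap, List.mem_map] at hr
  obtain ⟨i, -, rfl⟩ := hr
  simp

theorem map_getD_range {α β : Type} (l : List α) (f : α → β) (d : α) :
    (List.range l.length).map (fun k => f (l.getD k d)) = l.map f := by
  induction l with
  | nil => simp
  | cons x xs ih =>
    simp only [List.length_cons, List.range_succ_eq_map, List.map_cons, List.map_map]
    simpa using ih

theorem rev_getD {α : Type} (l : List α) (k : Nat) (d : α) (hk : k < l.length) :
    l.reverse.getD k d = l.getD (l.length - 1 - k) d := by
  rw [List.getD_eq_getElem l.reverse d (by simpa using hk),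
      List.getD_eq_getElem l d (by omega), List.getElem_reverse]

theorem flip_eq (g : List (List String)) : pyFlip g = g.map List.reverse := by
  simp only [pyFlip, PySem.List.slice?_none_none_neg_one, Option.getD_some]
  simpa using PySem.List.foldl_append_singleton_eq_map (fun r : List String => r.reverse) g []

theorem bHFlip_eq (g : List (List String)) : bHFlip g = g.map List.reverse := by
  simp [bHFlip, PySem.List.slice?_none_none_neg_one]

theorem freeze_eq (g : List (List String)) : pyFreeze g = g := by
  have h := PySem.List.foldl_append_singleton_eq_map (fun r : List String => r) g []
  simpa [pyFreeze] using h

theorem rotate_eq (g : List (List String)) :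
    pyRotate g = colMap (g.headD []).length g.reverse := by
  have hhead : (PySem.List.pyGet? g 0).getD [] = g.headD [] := by
    cases g <;> simp [PySem.List.pyGet?_zero]
  simp only [pyRotate, hhead, PySem.List.pyRange_zero_natCast, List.foldl_map,
    PySem.List.foldl_append_singleton_eq_map, List.nil_append]
  apply List.map_congr_left
  intro i _
  simp only [PySem.List.pyGetD_natCast]
  have hin : ∀ k ∈ List.range g.length,
      (PySem.List.pyGetD g ((g.length : Int) - 1 - (k : Int)) []).getD i "" =
        (g.reverse.getD k []).getD i "" := by
    intro k hk
    rw [List.mem_range] at hk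
    have hcast : ((g.length : Int) - 1 - (k : Int)) = ((g.length - 1 - k : Nat) : Int) := by
      push_cast [Nat.sub_sub]; omega
    rw [hcast, PySem.List.pyGetD_natCast, rev_getD g k [] hk]
  rw [List.map_congr_left hin]
  have := map_getD_range g.reverse (fun row => row.getD i "") []
  simpa using this

theorem rev_colMap (w : Nat) (g : List (List String)) :
    colMap w g.reverse = (colMap w g).map List.reverse := by
  simp [colMap, List.map_map, Function.comp_def, List.map_reverse]

theorem take_colMap (w : Nat) (g : List (List String)) (hw : ∀ r ∈ g, w ≤ r.length) :
    colMap w (g.map (fun r => r.take w)) = colMap w g := by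
  unfold colMap
  apply List.map_congr_left
  intro i hi
  rw [List.mem_range] at hi
  simp only [List.map_map]
  apply List.map_congr_left
  intro r hr
  have hwr := hw r hr
  rw [Function.comp_apply, List.getD_eq_getElem _ _ (by simp; omega),
      List.getD_eq_getElem _ _ (by omega), List.getElem_take]

theorem double_colMap (g : List (List String)) (w : Nat) (hw : ∀ r ∈ g, w ≤ r.length) :
    colMap g.length (colMap w g) = g.map (fun r => r.take w) := by
  apply List.ext_getElem
  · simp [length_colMap]
  · intro i hi hi'
    have hig : i < g.length := by simpa [length_colMap] using hi
    simp only [colMap, List.getElem_map, List.getElem_range, List.map_map]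
    apply List.ext_getElem
    · have : w ≤ g[i].length := hw _ (List.getElem_mem hig)
      simp; omega
    · intro j hj hj'
      have hjw : j < w := by simpa using hj
      have hwgi : w ≤ g[i].length := hw _ (List.getElem_mem hig)
      simp only [List.getElem_map, List.getElem_range, Function.comp_apply, List.getElem_take]
      rw [List.getD_eq_getElem _ _ (by simp [hig]), List.getElem_map,
          List.getD_eq_getElem _ _ (by omega)]

theorem revrows_colMap (h : Nat) (m : List (List String)) (hm : ∀ r ∈ m, r.length = h) :
    colMap h (m.map List.reverse) = (colMap h m).reverse := by
  apply List.ext_getElem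
  · simp [length_colMap]
  · intro i hi hi'
    have hih : i < h := by simpa [length_colMap] using hi
    simp only [colMap, List.getElem_map, List.getElem_range, List.map_map,
      List.getElem_reverse, List.length_map, List.length_range]
    apply List.map_congr_left
    intro r hr
    have hrl := hm r hr
    rw [Function.comp_apply, rev_getD r i "" (by omega)]
    congr 1
    omega

theorem headD_len_of_rows {g : List (List String)} {n : Nat}
    (hne : g ≠ []) (hrows : ∀ r ∈ g, r.length = n) : (g.headD []).length = n := by
  cases g with
  | nil => exact absurd rfl hne
  | cons r rs => exact hrows r (by simp)

theorem map_range_rev {α : Type} (w : Nat) (G : Nat → α) :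
    (List.range w).map (fun i => G (w - 1 - i)) = ((List.range w).map G).reverse := by
  apply List.ext_getElem
  · simp
  · intro k hk hk'
    have hkw : k < w := by simpa using hk
    simp only [List.getElem_map, List.getElem_range, List.getElem_reverse,
      List.length_map, List.length_range]

theorem map_getD_take (r : List String) (w : Nat) (hw : w ≤ r.length) :
    (List.range w).map (fun j => r.getD j "") = r.take w := by
  apply List.ext_getElem
  · simp; omega
  · intro k hk hk'
    have hkw : k < w := by simpa using hk
    simp only [List.getElem_map, List.getElem_range, List.getElem_take]
    rw [List.getD_eq_getElem _ _ (by omega)]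

theorem map_getD_take_rev (r : List String) (w : Nat) (hw : w ≤ r.length) :
    (List.range w).map (fun j => r.getD (w - 1 - j) "") = (r.take w).reverse := by
  rw [map_range_rev w (fun j => r.getD j ""), map_getD_take r w hw]

-- the three coordinate-map builds of B, characterised through colMap
theorem build90_eq (tile : List (List String)) (w : Nat) :
    bBuild (w : Int) (tile.length : Int)
      (fun i j => PySem.List.pyGetD (PySem.List.pyGetD tile ((tile.length : Int) - 1 - j) []) i "") =
    colMap w tile.reverse := by
  simp only [bBuild, PySem.List.pyRange_zero_natCast, List.map_map, Function.comp_def]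
  apply List.map_congr_left
  intro i _
  simp only [PySem.List.pyGetD_natCast]
  have hin : ∀ k ∈ List.range tile.length,
      (PySem.List.pyGetD tile ((tile.length : Int) - 1 - (k : Int)) []).getD i "" =
        (tile.reverse.getD k []).getD i "" := by
    intro k hk
    rw [List.mem_range] at hk
    have hcast : ((tile.length : Int) - 1 - (k : Int)) = ((tile.length - 1 - k : Nat) : Int) := by
      push_cast [Nat.sub_sub]; omega
    rw [hcast, PySem.List.pyGetD_natCast, rev_getD tile k [] hk]
  rw [List.map_congr_left hin]
  simpa using map_getD_range tile.reverse (fun row => row.getD i "") []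

theorem build180_eq (tile : List (List String)) (w : Nat)
    (hw : ∀ r ∈ tile, w ≤ r.length) :
    bBuild (tile.length : Int) (w : Int)
      (fun i j => PySem.List.pyGetD (PySem.List.pyGetD tile ((tile.length : Int) - 1 - i) [])
        ((w : Int) - 1 - j) "") =
    tile.reverse.map (fun r => (r.take w).reverse) := by
  simp only [bBuild, PySem.List.pyRange_zero_natCast, List.map_map, Function.comp_def]
  have step1 : ∀ i ∈ List.range tile.length,
      (List.range w).map (fun (j : Nat) =>
          PySem.List.pyGetD (PySem.List.pyGetD tile ((tile.length : Int) - 1 - (i : Int)) [])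
            ((w : Int) - 1 - ((j : Nat) : Int)) "") =
        ((tile.reverse.getD i []).take w).reverse := by
    intro i hi
    rw [List.mem_range] at hi
    have hcast : ((tile.length : Int) - 1 - (i : Int)) = ((tile.length - 1 - i : Nat) : Int) := by
      push_cast [Nat.sub_sub]; omega
    have hrow : PySem.List.pyGetD tile ((tile.length : Int) - 1 - (i : Int)) [] =
        tile.reverse.getD i [] := by
      rw [hcast, PySem.List.pyGetD_natCast, rev_getD tile i [] hi]
    simp only [hrow]
    have hji : ∀ j ∈ List.range w,
        PySem.List.pyGetD (tile.reverse.getD i []) ((w : Int) - 1 - ((j : Nat) : Int)) "" =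
          (tile.reverse.getD i []).getD (w - 1 - j) "" := by
      intro j hj
      rw [List.mem_range] at hj
      have hc : ((w : Int) - 1 - ((j : Nat) : Int)) = ((w - 1 - j : Nat) : Int) := by
        push_cast [Nat.sub_sub]; omega
      rw [hc, PySem.List.pyGetD_natCast]
    rw [List.map_congr_left hji]
    have hmem : tile.reverse.getD i [] ∈ tile := by
      rw [List.getD_eq_getElem _ _ (by simpa using hi)]
      exact List.mem_reverse.mp (List.getElem_mem (by simpa using hi))
    exact map_getD_take_rev _ w (hw _ hmem)
  rw [List.map_congr_left step1]
  simpa using map_getD_range tile.reverse (fun r => (r.take w).reverse) []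

theorem build270_eq (tile : List (List String)) (w : Nat) :
    bBuild (w : Int) (tile.length : Int)
      (fun i j => PySem.List.pyGetD (PySem.List.pyGetD tile j []) ((w : Int) - 1 - i) "") =
    (colMap w tile).reverse := by
  simp only [bBuild, PySem.List.pyRange_zero_natCast, List.map_map, Function.comp_def]
  have step1 : ∀ i ∈ List.range w,
      (List.range tile.length).map (fun (j : Nat) =>
          PySem.List.pyGetD (PySem.List.pyGetD tile ((j : Nat) : Int) [])
            ((w : Int) - 1 - ((i : Nat) : Int)) "") =
        tile.map (fun row => row.getD (w - 1 - i) "") := by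
    intro i hi
    rw [List.mem_range] at hi
    have hc : ((w : Int) - 1 - ((i : Nat) : Int)) = ((w - 1 - i : Nat) : Int) := by
      push_cast [Nat.sub_sub]; omega
    simp only [hc, PySem.List.pyGetD_natCast]
    simpa using map_getD_range tile (fun row => row.getD (w - 1 - i) "") []
  rw [List.map_congr_left step1]
  have := map_range_rev w (fun k => tile.map (fun row => row.getD k ""))
  simpa [colMap] using this

-- ===== VERDICT (by name: the statement is the Claim_ definition above) =====
theorem transform_spec : Claim_equal_transform := by
  intro tile _ hpre
  obtain ⟨hne, hh0, hrows⟩ := hpre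
  unfold Spec_transform
  set w : Nat := (tile.headD []).length with hwdef
  have hwpos : 0 < w := by
    cases tile with
    | nil => exact absurd rfl hne
    | cons r rs =>
      simp only [List.headD_cons] at hh0 ⊢
      cases r with
      | nil => exact absurd rfl hh0
      | cons a l => simp [hwdef]
  have hget0 : ((PySem.List.pyGet? tile 0).getD []).length = w := by
    cases tile <;> simp [PySem.List.pyGet?_zero, hwdef]
  set t := colMap w tile with htdef
  set trunc := tile.map (fun r => r.take w) with htruncdef
  have ht_rows : ∀ r ∈ t, r.length = tile.length := row_len_colMap w tile
  have ht_len : t.length = w := length_colMap w tile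
  -- A's first rotation
  have hr1 : pyRotate tile = t.map List.reverse := by
    rw [rotate_eq, ← hwdef, rev_colMap, ← htdef]
  -- A's second rotation
  have hr1_rows : ∀ r ∈ t.map List.reverse, r.length = tile.length := by
    intro r hr
    obtain ⟨c, hc, rfl⟩ := List.mem_map.mp hr
    simpa using ht_rows c hc
  have hr1_ne : t.map List.reverse ≠ [] := by
    have : (t.map List.reverse).length = w := by simp [ht_len]
    intro h; rw [h] at this; simp at this; omega
  have hr2 : pyRotate (t.map List.reverse) = trunc.reverse.map List.reverse := by
    rw [rotate_eq, headD_len_of_rows hr1_ne hr1_rows, rev_colMap,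
        revrows_colMap tile.length t ht_rows, htdef, double_colMap tile w hrows,
        ← htruncdef, List.map_reverse]
  -- A's third rotation
  have htrunc_rows : ∀ r ∈ trunc.reverse.map List.reverse, r.length = w := by
    intro r hr
    obtain ⟨c, hc, rfl⟩ := List.mem_map.mp hr
    rw [List.mem_reverse, htruncdef, List.mem_map] at hc
    obtain ⟨r0, hr0, rfl⟩ := hc
    have := hrows r0 hr0
    simp; omega
  have hr2_ne : trunc.reverse.map List.reverse ≠ [] := by
    have : (trunc.reverse.map List.reverse).length = tile.length := by simp [htruncdef]
    intro h; rw [h] at this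
    cases tile with
    | nil => exact absurd rfl hne
    | cons r rs => simp at this
  have htrunc_rows' : ∀ r ∈ trunc, r.length = w := by
    intro r hr
    rw [htruncdef, List.mem_map] at hr
    obtain ⟨r0, hr0, rfl⟩ := hr
    have := hrows r0 hr0
    simp; omega
  have hr3 : pyRotate (trunc.reverse.map List.reverse) = t.reverse := by
    rw [rotate_eq, headD_len_of_rows hr2_ne htrunc_rows]
    have : (trunc.reverse.map List.reverse).reverse = trunc.map List.reverse := by
      rw [← List.map_reverse, List.reverse_reverse]
    rw [this, revrows_colMap w trunc htrunc_rows', htdef, take_colMap w tile hrows]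
  -- B's 180-degree grid equals A's second rotation
  have hb180 : tile.reverse.map (fun r => (r.take w).reverse) = trunc.reverse.map List.reverse := by
    simp [htruncdef, List.map_reverse, List.map_map, Function.comp_def]
  -- assemble both sides
  simp only [transform, transform_alt, List.foldl_cons, List.foldl_nil, hget0]
  rw [build90_eq tile w, build180_eq tile w hrows, build270_eq tile w, hb180]
  simp only [hr1, hr2, hr3, flip_eq, freeze_eq, bHFlip_eq, List.map_cons, List.map_nil]
  rw [htdef, rev_colMap]
  simp
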